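-- pv_equiv track=rewrite | github.com/hao-liu-chn/RCPSP-LCTP | TabuSearch/tabu_exp2_10000.py | update_tabu_list
-- ===== SOURCE A (Python) =====
-- def update_tabu_list(Tabu_List_act, Tabu_List_mode):
--     if len(Tabu_List_act) != 0:
--         delet_list_act = []
--         for x in range(len(Tabu_List_act)):
--             Tabu_List_act[x][-1] -= 1
--             if Tabu_List_act[x][-1] == 0:
--                 delet_list_act.append(Tabu_List_act[x])
--         for d in delet_list_act:
--             Tabu_List_act.remove(d)
--
--     if len(Tabu_List_mode) != 0:
--         delet_list_mode = []
--         for x in range(len(Tabu_List_mode)):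
--             Tabu_List_mode[x][-1] -= 1
--             if Tabu_List_mode[x][-1] == 0:
--                 delet_list_mode.append(Tabu_List_mode[x])
--         for d in delet_list_mode:
--             Tabu_List_mode.remove(d)
--
--     return Tabu_List_act, Tabu_List_mode
-- ===== SOURCE B (Python) =====
-- def update_tabu_list(Tabu_List_act, Tabu_List_mode):
--     # Pure rebuild: decrement every tenure, keep the rows that are still alive.
--     # (Unlike A, this does not mutate the argument lists in place.)
--     def tick(L):
--         dec = [row[:-1] + [row[-1] - 1] for row in L]
--         return [r for r in dec if r[-1] != 0]
--     return tick(Tabu_List_act), tick(Tabu_List_mode)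
-- ===== Notes on version B (the rewrite author's own statement) =====
-- stated objective: simpler
-- what changed: Replaces A's in-place decrement pass plus a collected delete-list replayed through repeated list.remove scans by a pure one-pass rebuild: map a decremented copy of each row, filter out rows whose tenure reached 0 (no delete list, no .remove, no mutation; return value identical).
import Mathlib
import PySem

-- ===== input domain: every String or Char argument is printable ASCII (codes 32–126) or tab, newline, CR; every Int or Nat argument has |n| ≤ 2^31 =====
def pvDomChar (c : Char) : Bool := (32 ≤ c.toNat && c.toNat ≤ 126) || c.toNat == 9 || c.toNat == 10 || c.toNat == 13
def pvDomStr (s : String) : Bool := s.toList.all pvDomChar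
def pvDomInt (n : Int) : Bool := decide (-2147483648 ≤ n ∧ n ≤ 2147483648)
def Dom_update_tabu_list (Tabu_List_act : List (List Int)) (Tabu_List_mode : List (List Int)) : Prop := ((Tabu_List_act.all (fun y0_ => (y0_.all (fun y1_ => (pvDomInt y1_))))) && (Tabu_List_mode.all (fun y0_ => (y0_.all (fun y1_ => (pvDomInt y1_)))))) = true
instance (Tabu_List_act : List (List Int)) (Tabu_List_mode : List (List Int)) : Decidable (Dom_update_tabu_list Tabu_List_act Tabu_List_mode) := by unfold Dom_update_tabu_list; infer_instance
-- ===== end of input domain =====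

-- B rebuilds each list purely (decrement-copy then filter) instead of A's in-place decrement
-- plus delete-list replayed through repeated .remove scans; equivalence is about the RETURN
-- value only (A mutates its argument lists in place, B does not).

-- ===== PORT A =====
-- Tabu_List[x][-1] -= 1  (read then write at index -1; total form pySetD is exact under Pre_)
def pvDecRowA (r : List Int) : List Int :=
  match PySem.List.pyGet? r (-1) with
  | some v => PySem.List.pySetD r (-1) (v - 1)
  | none => r   -- unreachable under Pre_ (IndexError in Python)

-- Tabu_List.remove d  (d is always present when A runs; getD guard only makes it total)
def pvRemoveD (l : List (List Int)) (d : List Int) : List (List Int) :=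
  (PySem.List.remove? l d).getD l

-- one guarded block of A: decrement every row, collect rows whose last entry hit 0, remove them
def pvPhaseA (L : List (List Int)) : List (List Int) :=
  if L.length ≠ 0 then
    let L' := L.map pvDecRowA
    let del := L'.filter (fun r => PySem.List.pyGet? r (-1) == some 0)
    del.foldl pvRemoveD L'
  else L

def update_tabu_list (Tabu_List_act : List (List Int)) (Tabu_List_mode : List (List Int)) : List (List Int) × List (List Int) :=
  (pvPhaseA Tabu_List_act, pvPhaseA Tabu_List_mode)

-- ===== PORT B =====
-- row[:-1] + [row[-1] - 1]
def pvDecRowB (r : List Int) : List Int :=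
  PySem.List.slice r none (some (-1)) ++ [PySem.List.pyGetD r (-1) 0 - 1]

-- tick(L) = filter of the decremented copies
def pvTickB (L : List (List Int)) : List (List Int) :=
  (L.map pvDecRowB).filter (fun r => PySem.List.pyGetD r (-1) 0 != 0)

def update_tabu_list_alt (Tabu_List_act : List (List Int)) (Tabu_List_mode : List (List Int)) : List (List Int) × List (List Int) :=
  (pvTickB Tabu_List_act, pvTickB Tabu_List_mode)

-- ===== PRECONDITION & SPEC =====
-- Pre_ excludes exactly the inputs containing an empty row, on which both A and B raise
-- IndexError at row[-1].
def Pre_update_tabu_list (Tabu_List_act : List (List Int)) (Tabu_List_mode : List (List Int)) : Prop :=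
  (∀ r ∈ Tabu_List_act, r ≠ []) ∧ (∀ r ∈ Tabu_List_mode, r ≠ [])
instance (Tabu_List_act : List (List Int)) (Tabu_List_mode : List (List Int)) : Decidable (Pre_update_tabu_list Tabu_List_act Tabu_List_mode) := by unfold Pre_update_tabu_list; infer_instance

def pvWitness_update_tabu_list : List (List Int) × List (List Int) := ([[2], [7, 1]], [[3, 2]])

def Spec_update_tabu_list (Tabu_List_act : List (List Int)) (Tabu_List_mode : List (List Int)) (out : List (List Int) × List (List Int)) : Prop := out = update_tabu_list_alt Tabu_List_act Tabu_List_mode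
instance (Tabu_List_act : List (List Int)) (Tabu_List_mode : List (List Int)) (out : List (List Int) × List (List Int)) : Decidable (Spec_update_tabu_list Tabu_List_act Tabu_List_mode out) := by unfold Spec_update_tabu_list; infer_instance

-- ===== CLAIM (what is proved, stated in full; the proofs are below) =====
def Claim_equal_update_tabu_list : Prop := ∀ (Tabu_List_act : List (List Int)) (Tabu_List_mode : List (List Int)), Dom_update_tabu_list Tabu_List_act Tabu_List_mode → Pre_update_tabu_list Tabu_List_act Tabu_List_mode → Spec_update_tabu_list Tabu_List_act Tabu_List_mode (update_tabu_list Tabu_List_act Tabu_List_mode)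

-- ===== LEMMAS AND PROOFS =====

theorem pv_set_last (v : Int) : ∀ (r : List Int), r ≠ [] → r.set (r.length - 1) v = r.dropLast ++ [v]
  | [], h => absurd rfl h
  | [a], _ => rfl
  | a :: b :: t, _ => by
    have ih := pv_set_last v (b :: t) (by simp)
    simp only [List.length_cons, Nat.add_sub_cancel] at ih ⊢
    have : (b :: t).length - 1 + 1 = (b :: t).length := by simp
    simpa [List.set, ← this] using congrArg (a :: ·) ih

theorem pvDecRowA_eq (r : List Int) (h : r ≠ []) :
    pvDecRowA r = r.dropLast ++ [r.getLast h - 1] := by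
  have hg : PySem.List.pyGet? r (-1) = some (r.getLast h) := by
    rw [PySem.List.pyGet?_neg_one, List.getLast?_eq_some_getLast h]
  have hlen : 0 < r.length := List.length_pos_iff.mpr h
  unfold pvDecRowA
  rw [hg]
  simp only [PySem.List.pySetD, PySem.List.pySet?, PySem.List.pyIdx?]
  simp only [if_pos (by omega : (-1 : Int) ≥ -(r.length : Int))]
  have h1 : ((-1 : Int) + r.length).toNat = r.length - 1 := by omega
  simp [h1, pv_set_last _ r h]

theorem pvDecRowB_eq (r : List Int) (h : r ≠ []) :
    pvDecRowB r = r.dropLast ++ [r.getLast h - 1] := by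
  unfold pvDecRowB
  rw [PySem.List.slice_to_neg_one, PySem.List.pyGetD_neg_one r 0 h]

theorem pvRemoveD_cons_self (a : List Int) (l : List (List Int)) : pvRemoveD (a :: l) a = l := by
  simp [pvRemoveD]

theorem pvRemoveD_cons_ne (a d : List Int) (l : List (List Int)) (h : a ≠ d) :
    pvRemoveD (a :: l) d = a :: pvRemoveD l d := by
  unfold pvRemoveD
  rw [PySem.List.remove?_cons_of_ne l h]
  cases PySem.List.remove? l d <;> simp

theorem pv_fold_rm_cons (ds : List (List Int)) (a : List Int) (h : ∀ d ∈ ds, d ≠ a) :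
    ∀ l, ds.foldl pvRemoveD (a :: l) = a :: ds.foldl pvRemoveD l := by
  induction ds with
  | nil => intro l; rfl
  | cons d ds ih =>
    intro l
    have hda : a ≠ d := fun e => (h d (by simp)) e.symm
    simp only [List.foldl_cons, pvRemoveD_cons_ne a d l hda]
    exact ih (fun x hx => h x (by simp [hx])) _

-- removing the collected matches (first occurrences, in order) is exactly filtering them out
theorem pv_fold_rm_filter (p : List Int → Bool) :
    ∀ M : List (List Int), (M.filter p).foldl pvRemoveD M = M.filter (fun x => !p x) := by
  intro M
  induction M with
  | nil => rfl
  | cons a M ih =>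
    by_cases h : p a
    · simp only [List.filter_cons, h, if_pos trivial, List.foldl_cons,
        pvRemoveD_cons_self a M, ih]
      simp
    · have hp : p a = false := Bool.eq_false_iff.mpr h
      have hne : ∀ d ∈ M.filter p, d ≠ a := by
        intro d hd e
        have := List.of_mem_filter hd
        rw [e, hp] at this; exact Bool.false_ne_true this
      simp only [List.filter_cons, hp, Bool.false_eq_true, if_false,
        pv_fold_rm_cons (M.filter p) a hne M, ih]
      simp [hp]

theorem pvPhase_eq_tick (L : List (List Int)) (h : ∀ r ∈ L, r ≠ []) :
    pvPhaseA L = pvTickB L := by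
  cases L with
  | nil => rfl
  | cons a L0 =>
    unfold pvPhaseA pvTickB
    simp only [List.length_cons, Nat.succ_ne_zero, ne_eq, not_false_iff, if_pos]
    rw [pv_fold_rm_filter]
    have hmap : (a :: L0).map pvDecRowA = (a :: L0).map pvDecRowB := by
      apply List.map_congr_left
      intro r hr
      rw [pvDecRowA_eq r (h r hr), pvDecRowB_eq r (h r hr)]
    rw [hmap]
    apply List.filter_congr
    intro r hr
    obtain ⟨s, hs, rfl⟩ := List.mem_map.mp hr
    rw [pvDecRowB_eq s (h s hs)]
    rw [PySem.List.pyGet?_neg_one_append_singleton, PySem.List.pyGetD_neg_one_append_singleton]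
    by_cases hz : s.getLast (h s hs) - 1 = 0 <;> simp [hz, bne]

-- ===== VERDICT (by name: the statement is the Claim_ definition above) =====
theorem update_tabu_list_spec : Claim_equal_update_tabu_list := by
  intro act mode _ hpre
  unfold Spec_update_tabu_list update_tabu_list update_tabu_list_alt
  rw [pvPhase_eq_tick act hpre.1, pvPhase_eq_tick mode hpre.2]
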